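-- pv_equiv track=rewrite | github.com/htv2012/python-sandbox | topics/am_lich/src/amlich/__init__.py | to_vietnamese
-- ===== SOURCE A (Python) =====
-- def to_vietnamese(text: str):
--     can_lookup = {
--         "Giap": "Giáp",
--         "At": "Ất",
--         "Binh": "Bính",
--         "Dinh": "Đinh",
--         "Mau": "Mậu",
--         "Ky": "Kỷ",
--         "Canh": "Canh",
--         "Tan": "Tân",
--         "Nham": "Nhâm",
--         "Quy": "Quý",
--     }
--     chi_lookup = {
--         "Ti": "Tí",
--         "Suu": "Sửu",
--         "Dan": "Dần",
--         "Mao": "Mão",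
--         "Thin": "Thìn",
--         "Ty": "Tỵ",
--         "Ngo": "Ngọ",
--         "Mui": "Mùi",
--         "Than": "Thân",
--         "Dau": "Dậu",
--         "Tuat": "Tuất",
--         "Hoi": "Họi",
--     }
--
--     for table in [can_lookup, chi_lookup]:
--         for old, new in table.items():
--             text = text.replace(old, new)
--     return text
-- ===== SOURCE B (Python) =====
-- _TABLE = [
--     ("Giap", "Giáp"), ("At", "Ất"), ("Binh", "Bính"), ("Dinh", "Đinh"),
--     ("Mau", "Mậu"), ("Ky", "Kỷ"), ("Canh", "Canh"), ("Tan", "Tân"),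
--     ("Nham", "Nhâm"), ("Quy", "Quý"),
--     ("Ti", "Tí"), ("Suu", "Sửu"), ("Dan", "Dần"), ("Mao", "Mão"),
--     ("Thin", "Thìn"), ("Ty", "Tỵ"), ("Ngo", "Ngọ"), ("Mui", "Mùi"),
--     ("Than", "Thân"), ("Dau", "Dậu"), ("Tuat", "Tuất"), ("Hoi", "Họi"),
-- ]
--
--
-- def to_vietnamese(text: str):
--     out = []
--     i = 0
--     n = len(text)
--     while i < n:
--         for old, new in _TABLE:
--             if text.startswith(old, i):
--                 out.append(new)
--                 i += len(old)
--                 break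
--         else:
--             out.append(text[i])
--             i += 1
--     return "".join(out)
-- ===== Notes on version B (the rewrite author's own statement) =====
-- stated objective: alternative
-- what changed: Replaces A's 22 sequential full-string replace passes by a single left-to-right scan that, at each position, takes the first matching key from one merged table (correct because no key is a prefix of another and replacements cannot create or destroy later matches).
import Mathlib
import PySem

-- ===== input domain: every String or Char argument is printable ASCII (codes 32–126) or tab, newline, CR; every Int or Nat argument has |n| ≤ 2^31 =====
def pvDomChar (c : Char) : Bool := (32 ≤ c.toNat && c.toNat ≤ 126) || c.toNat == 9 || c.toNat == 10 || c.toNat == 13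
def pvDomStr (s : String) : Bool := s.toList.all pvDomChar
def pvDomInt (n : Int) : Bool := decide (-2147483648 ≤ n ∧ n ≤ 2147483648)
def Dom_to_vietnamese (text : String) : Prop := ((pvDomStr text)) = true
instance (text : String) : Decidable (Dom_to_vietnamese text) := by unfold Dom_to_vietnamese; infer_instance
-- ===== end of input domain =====

-- B replaces A's 22 sequential full-string replace passes by a single left-to-right
-- scan with one merged first-match table (objective: alternative; same asymptotic cost).

-- ===== PORT A =====
def to_vietnamese (text : String) : String :=
  let can_lookup : PySem.Dict String String := PySem.Dict.mk
    [("Giap", "Giáp"), ("At", "Ất"), ("Binh", "Bính"), ("Dinh", "Đinh"),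
     ("Mau", "Mậu"), ("Ky", "Kỷ"), ("Canh", "Canh"), ("Tan", "Tân"),
     ("Nham", "Nhâm"), ("Quy", "Quý")]
  let chi_lookup : PySem.Dict String String := PySem.Dict.mk
    [("Ti", "Tí"), ("Suu", "Sửu"), ("Dan", "Dần"), ("Mao", "Mão"),
     ("Thin", "Thìn"), ("Ty", "Tỵ"), ("Ngo", "Ngọ"), ("Mui", "Mùi"),
     ("Than", "Thân"), ("Dau", "Dậu"), ("Tuat", "Tuất"), ("Hoi", "Họi")]
  [can_lookup, chi_lookup].foldl
    (fun t table => table.items.foldl (fun t p => PySem.Str.replace t p.1 p.2) t)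
    text

-- ===== PORT B =====
-- B's merged table (_TABLE in Source B), as char lists
def pvTable : List (List Char × List Char) :=
  [(['G','i','a','p'], ['G','i','á','p']), (['A','t'], ['Ấ','t']),
   (['B','i','n','h'], ['B','í','n','h']), (['D','i','n','h'], ['Đ','i','n','h']),
   (['M','a','u'], ['M','ậ','u']), (['K','y'], ['K','ỷ']),
   (['C','a','n','h'], ['C','a','n','h']), (['T','a','n'], ['T','â','n']),
   (['N','h','a','m'], ['N','h','â','m']), (['Q','u','y'], ['Q','u','ý']),
   (['T','i'], ['T','í']), (['S','u','u'], ['S','ử','u']),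
   (['D','a','n'], ['D','ầ','n']), (['M','a','o'], ['M','ã','o']),
   (['T','h','i','n'], ['T','h','ì','n']), (['T','y'], ['T','ỵ']),
   (['N','g','o'], ['N','g','ọ']), (['M','u','i'], ['M','ù','i']),
   (['T','h','a','n'], ['T','h','â','n']), (['D','a','u'], ['D','ậ','u']),
   (['T','u','a','t'], ['T','u','ấ','t']), (['H','o','i'], ['H','ọ','i'])]

-- B's while-loop: at each position emit either the first matching table entry's
-- replacement (advancing by the key's length) or the current character
def pvScan : List Char → List Char
  | [] => []
  | c :: t =>
    match h : pvTable.find? (fun p => p.1.isPrefixOf (c :: t)) with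
    | some p => p.2 ++ pvScan ((c :: t).drop p.1.length)
    | none => c :: pvScan t
termination_by l => l.length
decreasing_by
  · have hmem := List.mem_of_find?_eq_some h
    have hpos : 0 < p.1.length := by
      revert hmem; unfold pvTable; intro hmem
      fin_cases hmem <;> decide
    simp [List.length_drop]
    omega
  · simp

def to_vietnamese_alt (text : String) : String := String.ofList (pvScan text.toList)

-- ===== PRECONDITION & SPEC =====
def Spec_to_vietnamese (text : String) (out : String) : Prop := out = to_vietnamese_alt text
instance (text : String) (out : String) : Decidable (Spec_to_vietnamese text out) := by unfold Spec_to_vietnamese; infer_instance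

-- ===== CLAIM (what is proved, stated in full; the proofs are below) =====
def Claim_equal_to_vietnamese : Prop := ∀ (text : String), Dom_to_vietnamese text → Spec_to_vietnamese text (to_vietnamese text)

-- ===== LEMMAS AND PROOFS =====

-- structural clone of Python str.replace for a nonempty pattern
def pvRepl (old new : List Char) : List Char → List Char
  | [] => []
  | c :: t =>
    if old.isPrefixOf (c :: t) then new ++ pvRepl old new (t.drop (old.length - 1))
    else c :: pvRepl old new t
termination_by l => l.length
decreasing_by
  all_goals simp [List.length_drop]

theorem pvRepl_go (old new : List Char) (hold : old ≠ []) :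
    ∀ fuel l acc, l.length ≤ fuel →
      PySem.Chars.replace.go old new fuel l acc = acc.reverse ++ pvRepl old new l := by
  intro fuel
  induction fuel with
  | zero =>
    intro l acc hl
    have : l = [] := List.eq_nil_of_length_eq_zero (by omega)
    subst this
    simp [PySem.Chars.replace.go, pvRepl]
  | succ n ih =>
    intro l acc hl
    match l with
    | [] => simp [PySem.Chars.replace.go, pvRepl]
    | c :: t =>
      rw [PySem.Chars.replace.go]
      by_cases hpre : old.isPrefixOf (c :: t)
      · simp only [hpre, if_true]
        rw [pvRepl]
        simp only [hpre, if_true]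
        have hlen : 0 < old.length := by cases old <;> simp_all
        have : (List.drop old.length (c :: t)).length ≤ n := by
          simp [List.length_drop] at *; omega
        rw [ih _ _ this]
        have hdrop : List.drop old.length (c :: t) = t.drop (old.length - 1) := by
          cases old with
          | nil => simp_all
          | cons o os => simp
        rw [hdrop]; simp
      · simp only [hpre]
        rw [pvRepl]
        simp only [hpre]
        have : t.length ≤ n := by simp at hl; omega
        rw [ih _ _ this]
        simp

theorem replace_eq_pvRepl (old new l : List Char) (hold : old ≠ []) :
    PySem.Chars.replace l old new = pvRepl old new l := by
  rw [PySem.Chars.replace]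
  have : old.isEmpty = false := by cases old <;> simp_all
  rw [this]
  simpa using pvRepl_go old new hold l.length l [] le_rfl

theorem replace_eq_pvRepl' (l : List Char) (oc : Char) (o' new : List Char) :
    PySem.Chars.replace l (oc :: o') new = pvRepl (oc :: o') new l :=
  replace_eq_pvRepl _ _ _ (by simp)

-- reflection: an all-"≠ new.head" prefix of the replaced string is a prefix of the original
theorem pvRepl_prefix_reflect (old : List Char) (nc : Char) (n' : List Char) :
    ∀ t p, (∀ ch ∈ p, ch ≠ nc) → p <+: pvRepl old (nc :: n') t → p <+: t := by
  intro t
  induction t using pvRepl.induct old with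
  | case1 => intro p hp hpre; rw [pvRepl] at hpre; simpa using hpre
  | case2 c t hmatch ih =>
    intro p hp hpre
    rw [pvRepl] at hpre
    simp only [hmatch, if_true] at hpre
    match p with
    | [] => exact List.nil_prefix
    | q :: p' =>
      rw [List.cons_append] at hpre
      exact absurd (List.cons_prefix_cons.mp hpre).1 (hp q (by simp))
  | case3 c t hmatch ih =>
    intro p hp hpre
    rw [pvRepl] at hpre
    simp only [hmatch] at hpre
    match p with
    | [] => exact List.nil_prefix
    | q :: p' =>
      rcases List.cons_prefix_cons.mp hpre with ⟨rfl, h2⟩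
      exact List.cons_prefix_cons.mpr ⟨rfl, ih p' (fun ch hch => hp ch (by simp [hch])) h2⟩

theorem not_prefix_append (x y u : List Char) (h1 : ¬ x <+: y) (h2 : ¬ y <+: x) :
    ¬ x <+: y ++ u := by
  intro h
  by_cases hle : x.length ≤ y.length
  · exact h1 (List.prefix_of_prefix_length_le h (y.prefix_append u) hle)
  · exact h2 (List.prefix_of_prefix_length_le (y.prefix_append u) h (by omega))

theorem pvRepl_head (oc : Char) (o' new u : List Char) :
    pvRepl (oc :: o') new ((oc :: o') ++ u) = new ++ pvRepl (oc :: o') new u := by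
  rw [List.cons_append, pvRepl]
  have hpre : (oc :: o').isPrefixOf (oc :: (o' ++ u)) = true := by
    rw [List.isPrefixOf_iff_prefix]
    exact List.cons_prefix_cons.mpr ⟨rfl, o'.prefix_append u⟩
  rw [if_pos hpre]
  simp

theorem pvRepl_append (oc : Char) (o' new : List Char) :
    ∀ a u, (∀ ch ∈ a.drop 1, ch ≠ oc) → (a = [] ∨ ¬ (oc :: o') <+: a ++ u) →
      pvRepl (oc :: o') new (a ++ u) = a ++ pvRepl (oc :: o') new u := by
  intro a
  induction a with
  | nil => intro u _ _; simp
  | cons c a' ih =>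
    intro u hlo hnp
    rcases hnp with h | hnp
    · simp at h
    rw [List.cons_append, pvRepl]
    rw [if_neg (by rw [List.isPrefixOf_iff_prefix]; rw [List.cons_append] at hnp; exact hnp)]
    congr 1
    apply ih
    · intro ch hch; exact hlo ch (by cases a' with | nil => simp at hch | cons d a'' => simpa using Or.inr (by simpa using hch))
    · cases a' with
      | nil => exact Or.inl rfl
      | cons d a'' =>
        refine Or.inr ?_
        intro hp
        have hd : d = oc := ((List.cons_prefix_cons.mp (by simpa using hp)).1).symm
        exact hlo d (by simp) hd

-- chained replaces over a table (the shape of port A, at the char-list level)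
def pvChain (T : List (List Char × List Char)) (s : List Char) : List Char :=
  T.foldl (fun s p => pvRepl p.1 p.2 s) s

def pvLower (c : Char) : Prop := 97 ≤ c.toNat ∧ c.toNat ≤ 122
def pvUpper (c : Char) : Prop := 65 ≤ c.toNat ∧ c.toNat ≤ 90

theorem pvLower_ne_pvUpper {c d : Char} (hc : pvLower c) (hd : pvUpper d) : c ≠ d := by
  rintro rfl
  simp [pvLower, pvUpper] at hc hd
  omega

theorem not_pvUpper_ne {c d : Char} (hc : ¬ pvUpper c) (hd : pvUpper d) : c ≠ d := by
  rintro rfl; exact hc hd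

-- table side conditions that make chained replaces equal one simultaneous scan:
-- keys start upper, continue lower; replacements start non-lower, continue non-upper;
-- keys pairwise non-prefix; later keys incomparable with earlier replacements
def pvEntryOK (p : List Char × List Char) : Prop :=
  p.1 ≠ [] ∧ p.2 ≠ [] ∧ pvUpper (p.1.headD ' ') ∧ ¬ pvLower (p.2.headD ' ') ∧
    (∀ ch ∈ p.1.drop 1, pvLower ch) ∧ (∀ ch ∈ p.2.drop 1, ¬ pvUpper ch)

def pvPairOK (p q : List Char × List Char) : Prop :=
  (¬ p.1 <+: q.1 ∧ ¬ q.1 <+: p.1) ∧ (¬ q.1 <+: p.2 ∧ ¬ p.2 <+: q.1)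

def pvTableOK (T : List (List Char × List Char)) : Prop :=
  (∀ p ∈ T, pvEntryOK p) ∧ T.Pairwise pvPairOK

theorem chain_nil (T : List (List Char × List Char)) : pvChain T [] = [] := by
  induction T with
  | nil => rfl
  | cons p T' ih => simpa [pvChain, pvRepl] using ih

theorem chain_cons (T : List (List Char × List Char)) (hT : ∀ p ∈ T, pvEntryOK p) :
    ∀ (c : Char) (t : List Char), (∀ p ∈ T, ¬ p.1 <+: c :: t) →
      pvChain T (c :: t) = c :: pvChain T t := by
  induction T with
  | nil => intro c t _; rfl
  | cons p T' ih =>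
    intro c t hno
    obtain ⟨h1, h2, h3, h4, h5, h6⟩ := hT p (by simp)
    obtain ⟨oc, o', ho⟩ : ∃ oc o', p.1 = oc :: o' := by
      cases hp : p.1 with | nil => exact absurd hp h1 | cons a b => exact ⟨a, b, rfl⟩
    obtain ⟨nc, n', hn⟩ : ∃ nc n', p.2 = nc :: n' := by
      cases hp : p.2 with | nil => exact absurd hp h2 | cons a b => exact ⟨a, b, rfl⟩
    have hstep : pvRepl p.1 p.2 (c :: t) = c :: pvRepl p.1 p.2 t := by
      rw [ho, hn]
      have := pvRepl_append oc o' (nc :: n') [c] t (by simp)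
        (Or.inr (by simpa [← ho] using hno p (by simp)))
      simpa using this
    show pvChain T' (pvRepl p.1 p.2 (c :: t)) = c :: pvChain T' (pvRepl p.1 p.2 t)
    rw [hstep]
    apply ih (fun q hq => hT q (by simp [hq]))
    -- remaining: no key of T' matches at the head of c :: pvRepl p.1 p.2 t
    intro q hq hpre
    obtain ⟨hq1, _, _, _, hq5, _⟩ := hT q (by simp [hq])
    obtain ⟨qc, q', hqe⟩ : ∃ qc q', q.1 = qc :: q' := by
      cases hp : q.1 with | nil => exact absurd hp hq1 | cons a b => exact ⟨a, b, rfl⟩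
    rw [hqe] at hpre
    rcases List.cons_prefix_cons.mp hpre with ⟨rfl, hq't⟩
    have hq'lo : ∀ ch ∈ q', ch ≠ nc := by
      intro ch hch
      have hlch : pvLower ch := hq5 ch (by simp [hqe, hch])
      intro hchnc
      exact h4 (by rw [hn]; simpa [← hchnc] using hlch)
    have : q' <+: t := pvRepl_prefix_reflect p.1 nc n' t q' hq'lo (by rwa [← hn])
    exact hno q (by simp [hq]) (by rw [hqe]; exact List.cons_prefix_cons.mpr ⟨rfl, this⟩)

theorem chain_append (T : List (List Char × List Char)) (hT : ∀ p ∈ T, p.1 ≠ []) (a : List Char)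
    (H : ∀ p ∈ T, (¬ p.1 <+: a ∧ ¬ a <+: p.1) ∧ (∀ ch ∈ a.drop 1, ch ≠ p.1.headD ' ')) :
    ∀ t, pvChain T (a ++ t) = a ++ pvChain T t := by
  induction T with
  | nil => intro t; rfl
  | cons p T' ih =>
    intro t
    obtain ⟨oc, o', ho⟩ : ∃ oc o', p.1 = oc :: o' := by
      cases hp : p.1 with | nil => exact absurd hp (hT p (by simp)) | cons x b => exact ⟨x, b, rfl⟩
    have hstep : pvRepl p.1 p.2 (a ++ t) = a ++ pvRepl p.1 p.2 t := by
      rw [ho]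
      apply pvRepl_append
      · intro ch hch
        have := (H p (by simp)).2 ch hch
        simpa [ho] using this
      · rcases List.eq_nil_or_concat a with rfl | _
        · exact Or.inl rfl
        · refine Or.inr ?_
          rw [← ho]
          exact not_prefix_append _ _ _ ((H p (by simp)).1.1) ((H p (by simp)).1.2)
    show pvChain T' (pvRepl p.1 p.2 (a ++ t)) = a ++ pvChain T' (pvRepl p.1 p.2 t)
    rw [hstep]
    exact ih (fun q hq => hT q (by simp [hq])) (fun q hq => H q (by simp [hq])) _

theorem chain_match (T : List (List Char × List Char)) (hT : pvTableOK T)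
    (p : List Char × List Char) (hp : p ∈ T) (t : List Char) :
    pvChain T (p.1 ++ t) = p.2 ++ pvChain T t := by
  obtain ⟨T1, T2, rfl⟩ := List.append_of_mem hp
  obtain ⟨hmem, hpw⟩ := hT
  rw [List.pairwise_append] at hpw
  obtain ⟨hpw1, hpw2, hcross⟩ := hpw
  rw [List.pairwise_cons] at hpw2
  obtain ⟨hpT2, _⟩ := hpw2
  obtain ⟨h1, h2, h3, h4, h5, h6⟩ := hmem p (by simp)
  obtain ⟨oc, o', ho⟩ : ∃ oc o', p.1 = oc :: o' := by
    cases hq : p.1 with | nil => exact absurd hq h1 | cons x b => exact ⟨x, b, rfl⟩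
  have key : ∀ s, pvChain (T1 ++ p :: T2) s = pvChain T2 (pvRepl p.1 p.2 (pvChain T1 s)) := by
    intro s; simp [pvChain, List.foldl_append]
  rw [key, key]
  have hA : pvChain T1 (p.1 ++ t) = p.1 ++ pvChain T1 t := by
    apply chain_append
    · intro q hq; exact (hmem q (by simp [hq])).1
    · intro q hq
      have hc := hcross q hq p (by simp)
      refine ⟨⟨hc.1.1, hc.1.2⟩, ?_⟩
      intro ch hch
      have hlch : pvLower ch := h5 ch hch
      obtain ⟨hq1, _, hq3, _⟩ := hmem q (by simp [hq])
      exact pvLower_ne_pvUpper hlch hq3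
  rw [hA, ho, pvRepl_head, ← ho]
  have hB : ∀ v, pvChain T2 (p.2 ++ v) = p.2 ++ pvChain T2 v := by
    apply chain_append
    · intro q hq; exact (hmem q (by simp [hq])).1
    · intro q hq
      have hc := hpT2 q hq
      refine ⟨⟨hc.2.1, hc.2.2⟩, ?_⟩
      intro ch hch
      obtain ⟨hq1, _, hq3, _⟩ := hmem q (by simp [hq])
      exact not_pvUpper_ne (h6 ch hch) hq3
  rw [hB]

theorem tableOK : pvTableOK pvTable := by
  constructor
  · simp [pvTable, pvEntryOK, pvLower, pvUpper]
  · simp [pvTable, pvPairOK, List.pairwise_cons, List.cons_prefix_cons]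

theorem pvScan_none (c : Char) (t : List Char)
    (h : pvTable.find? (fun p => p.1.isPrefixOf (c :: t)) = none) :
    pvScan (c :: t) = c :: pvScan t := by
  rw [pvScan]
  split <;> simp_all

theorem pvScan_some (c : Char) (t : List Char) (p : List Char × List Char)
    (h : pvTable.find? (fun q => q.1.isPrefixOf (c :: t)) = some p) :
    pvScan (c :: t) = p.2 ++ pvScan ((c :: t).drop p.1.length) := by
  rw [pvScan]
  split <;> simp_all

theorem chain_eq_scan_aux : ∀ (n : Nat) (l : List Char), l.length ≤ n →
    pvChain pvTable l = pvScan l := by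
  intro n
  induction n with
  | zero =>
    intro l hl
    have : l = [] := List.eq_nil_of_length_eq_zero (by omega)
    subst this
    rw [chain_nil, pvScan]
  | succ n ih =>
    intro l hl
    match l with
    | [] => rw [chain_nil, pvScan]
    | c :: t =>
      cases h : pvTable.find? (fun p => p.1.isPrefixOf (c :: t)) with
      | none =>
        rw [pvScan_none c t h]
        rw [chain_cons pvTable tableOK.1 c t]
        · rw [ih t (by simp at hl; omega)]
        · intro p hp hpre
          have := List.find?_eq_none.mp h p hp
          simp [List.isPrefixOf_iff_prefix] at this
          exact this hpre
      | some p =>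
        have hpmem := List.mem_of_find?_eq_some h
        have hpre : p.1 <+: c :: t :=
          List.isPrefixOf_iff_prefix.mp (by simpa using List.find?_some h)
        obtain ⟨u, hu⟩ := hpre
        have hplen : 0 < p.1.length := by
          have := tableOK.1 p hpmem
          cases hq : p.1 with
          | nil => exact absurd hq this.1
          | cons x b => simp
        rw [pvScan_some c t p h, ← hu, List.drop_left]
        rw [chain_match pvTable tableOK p hpmem u]
        rw [ih u (by
          have : (p.1 ++ u).length ≤ n + 1 := by rw [hu]; exact hl
          simp [List.length_append] at this
          omega)]

theorem chain_eq_scan (l : List Char) : pvChain pvTable l = pvScan l :=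
  chain_eq_scan_aux l.length l le_rfl

theorem portA_toList (text : String) :
    (to_vietnamese text).toList = pvChain pvTable text.toList := by
  simp [to_vietnamese, pvChain, pvTable, replace_eq_pvRepl']

-- ===== VERDICT (by name: the statement is the Claim_ definition above) =====
theorem to_vietnamese_spec : Claim_equal_to_vietnamese := by
  intro text _
  unfold Spec_to_vietnamese
  apply String.toList_inj.mp
  rw [portA_toList, chain_eq_scan]
  simp [to_vietnamese_alt]
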